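-- pv_equiv track=rewrite | github.com/NBsyxx/English_Extractive_Summarizer | textRank.py | cut_sentences
-- ===== SOURCE A (Python) =====
-- def cut_sentences(sentence):
--     puns = frozenset('.')
--     tmp = []
--     for ch in sentence:
--         tmp.append(ch)
--         if puns.__contains__(ch):
--             yield ''.join(tmp)
--             tmp = []
--     yield ''.join(tmp)
-- ===== SOURCE B (Python) =====
-- def cut_sentences(sentence):
--     parts = sentence.split('.')
--     for part in parts[:-1]:
--         yield part + '.'
--     yield parts[-1]
-- ===== Notes on version B (the rewrite author's own statement) =====
-- stated objective: simpler
-- what changed: Replaces the char-by-char accumulate-and-reset loop with one str.split on the period followed by re-emitting each non-final piece with its period restored and the final piece unchanged.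
import Mathlib
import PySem

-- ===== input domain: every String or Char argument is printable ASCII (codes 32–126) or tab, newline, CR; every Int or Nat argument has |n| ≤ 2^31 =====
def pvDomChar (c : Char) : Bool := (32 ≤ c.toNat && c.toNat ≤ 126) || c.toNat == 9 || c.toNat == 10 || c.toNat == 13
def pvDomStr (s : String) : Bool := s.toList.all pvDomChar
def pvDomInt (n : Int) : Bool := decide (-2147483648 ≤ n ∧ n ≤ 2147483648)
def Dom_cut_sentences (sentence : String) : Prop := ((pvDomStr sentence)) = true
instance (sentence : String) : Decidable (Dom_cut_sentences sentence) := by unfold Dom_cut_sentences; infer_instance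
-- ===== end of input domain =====

-- B replaces A's char-by-char accumulate-and-reset loop by split('.') then re-emitting the pieces (simpler); equivalence proved about the yielded sequence as a list.


-- ===== PORT A =====
-- the generator's loop: tmp accumulates chars; on '.' the joined tmp is yielded and tmp reset;
-- after the loop the remaining tmp is yielded.
def cutA_go (cs : List Char) (tmp : List Char) : List String :=
  match cs with
  | [] => [String.mk tmp]
  | c :: rest =>
      if c = '.' then String.mk (tmp ++ [c]) :: cutA_go rest []
      else cutA_go rest (tmp ++ [c])

def cut_sentences (sentence : String) : List String := cutA_go sentence.toList []

-- ===== PORT B =====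
-- sentence.split('.') — hand port of str.split for the single-char separator '.', exact there
def splitDot (cs : List Char) : List (List Char) :=
  match cs with
  | [] => [[]]
  | c :: rest =>
      if c = '.' then [] :: splitDot rest
      else match splitDot rest with
           | p :: ps => (c :: p) :: ps
           | [] => [[c]]

-- the generator body: each non-final part with '.' re-attached, then the final part unchanged
def emitParts (parts : List (List Char)) : List String :=
  match parts with
  | [] => []
  | [last] => [String.mk last]
  | p :: rest => String.mk (p ++ ['.']) :: emitParts rest

def cut_sentences_alt (sentence : String) : List String := emitParts (splitDot sentence.toList)

-- ===== PRECONDITION & SPEC =====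
def Spec_cut_sentences (sentence : String) (out : List String) : Prop := out = cut_sentences_alt sentence
instance (sentence : String) (out : List String) : Decidable (Spec_cut_sentences sentence out) := by unfold Spec_cut_sentences; infer_instance

-- ===== CLAIM (what is proved, stated in full; the proofs are below) =====
def Claim_equal_cut_sentences : Prop := ∀ (sentence : String), Dom_cut_sentences sentence → Spec_cut_sentences sentence (cut_sentences sentence)

-- ===== LEMMAS AND PROOFS =====
theorem splitDot_ne_nil (cs : List Char) : splitDot cs ≠ [] := by
  cases cs with
  | nil => simp [splitDot]
  | cons c rest =>
    simp only [splitDot]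
    split
    · simp
    · cases h : splitDot rest <;> simp

theorem cutA_go_eq (cs : List Char) : ∀ tmp,
    cutA_go cs tmp =
      emitParts (match splitDot cs with
                 | p :: ps => (tmp ++ p) :: ps
                 | [] => []) := by
  induction cs with
  | nil => intro tmp; simp [cutA_go, splitDot, emitParts]
  | cons c rest ih =>
    intro tmp
    by_cases hc : c = '.'
    · subst hc
      simp only [cutA_go, splitDot, if_pos rfl]
      rw [ih []]
      cases h : splitDot rest with
      | nil => exact absurd h (splitDot_ne_nil rest)
      | cons p ps => simp [emitParts]
    · simp only [cutA_go, splitDot, if_neg hc]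
      rw [ih (tmp ++ [c])]
      cases h : splitDot rest with
      | nil => exact absurd h (splitDot_ne_nil rest)
      | cons p ps => simp

-- ===== VERDICT (by name: the statement is the Claim_ definition above) =====
theorem cut_sentences_spec : Claim_equal_cut_sentences := by
  intro s _
  unfold Spec_cut_sentences cut_sentences cut_sentences_alt
  rw [cutA_go_eq]
  cases h : splitDot s.toList with
  | nil => exact absurd h (splitDot_ne_nil _)
  | cons p ps => simp
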